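-- pv_equiv track=rewrite | github.com/rashikakhandelwal225/DSA-practice | dsa/Light War.py | stonebreaker
-- ===== SOURCE A (Python) =====
-- def stonebreaker(nums):
--     while len(nums) > 1:
--         # Find the two lightest stones
--         min_index_1 = nums.index(min(nums))
--         x = nums.pop(min_index_1)
--
--         min_index_2 = nums.index(min(nums))
--         y = nums.pop(min_index_2)
--
--         # Smash the stones and update the array
--         if x != y:
--             nums.append(y - x)
--
--     # If there's a stone left, return its weight; otherwise, return 0
--     return nums[0] if nums else 0
-- ===== SOURCE B (Python) =====
-- def stonebreaker(nums):
--     # Sort once, then keep the working list sorted: the two lightest stones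
--     # are always the first two; the positive difference is inserted back in
--     # order with a single linear scan (no repeated min() passes over the list).
--     # Note: unlike A, this does not mutate the caller's list.
--     h = sorted(nums)
--     while len(h) > 1:
--         d = h[1] - h[0]
--         h = h[2:]
--         if d:
--             i = 0
--             while i < len(h) and h[i] < d:
--                 i += 1
--             h.insert(i, d)
--     return h[0] if h else 0
-- ===== Notes on version B (the rewrite author's own statement) =====
-- stated objective: faster
-- what changed: Replaces the repeated min()/index()/pop() scans over an unsorted list with a single initial sort plus an ordered-insert of each difference into a list kept sorted, so each round reads the two lightest stones directly at the front.
import Mathlib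
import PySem

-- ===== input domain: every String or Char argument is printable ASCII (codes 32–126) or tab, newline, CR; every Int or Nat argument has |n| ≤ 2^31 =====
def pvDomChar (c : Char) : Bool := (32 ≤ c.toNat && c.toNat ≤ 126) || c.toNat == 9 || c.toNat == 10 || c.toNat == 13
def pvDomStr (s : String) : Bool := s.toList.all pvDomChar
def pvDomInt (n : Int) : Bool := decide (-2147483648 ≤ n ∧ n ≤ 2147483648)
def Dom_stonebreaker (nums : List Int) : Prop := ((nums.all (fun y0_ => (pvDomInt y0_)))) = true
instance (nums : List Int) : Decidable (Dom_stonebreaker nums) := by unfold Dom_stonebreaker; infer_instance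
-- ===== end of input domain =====

-- B replaces A's repeated min/index/pop scans over an unsorted list by one initial sort plus an
-- ordered insert of each difference (objective: faster; the per-round full scans disappear).
-- A mutates its argument in place (pops it empty); B does not — the equivalence proved here is
-- about the return value only.


-- ===== PORT A =====
-- while len(nums) > 1: pop the first occurrence of min twice, append y - x if x != y.
-- Each round shortens the list by at least 1, so fuel = initial length always suffices
-- (fuel is only a totality guard; the `none` branches are unreachable under the length guard).
def stoneLoop : Nat → List Int → List Int
  | 0, nums => nums
  | fuel + 1, nums =>
    if 1 < nums.length then
      match PySem.List.min? nums (fun v => v) with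
      | none => nums
      | some m1 =>
        match PySem.List.index? nums m1 with
        | none => nums
        | some i1 =>
          match PySem.List.pop? nums (i1 : Int) with
          | none => nums
          | some (x, rest1) =>
            match PySem.List.min? rest1 (fun v => v) with
            | none => rest1
            | some m2 =>
              match PySem.List.index? rest1 m2 with
              | none => rest1
              | some i2 =>
                match PySem.List.pop? rest1 (i2 : Int) with
                | none => rest1
                | some (y, rest2) =>
                  stoneLoop fuel (if x ≠ y then rest2 ++ [y - x] else rest2)
    else nums

def stonebreaker (nums : List Int) : Int :=
  match stoneLoop nums.length nums with
  | [] => 0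
  | a :: _ => a

-- ===== PORT B =====
-- the hand-written ordered insert of Source B: scan past smaller elements, insert
def insortLoop (d : Int) : List Int → List Int
  | [] => [d]
  | b :: t => if b < d then b :: insortLoop d t else d :: b :: t

theorem length_insortLoop (d : Int) (l : List Int) :
    (insortLoop d l).length = l.length + 1 := by
  induction l with
  | nil => rfl
  | cons b t ih => simp only [insortLoop]; split <;> simp [ih]

-- while len(h) > 1: d = h[1] - h[0]; h = h[2:]; if d: ordered-insert d
def altLoop : List Int → List Int
  | x :: y :: t =>
    let d := y - x
    if d ≠ 0 then altLoop (insortLoop d t) else altLoop t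
  | l => l
termination_by l => l.length
decreasing_by
  · simp [length_insortLoop]
  · simp

def stonebreaker_alt (nums : List Int) : Int :=
  match altLoop (PySem.List.sorted nums (fun v => v) false) with
  | [] => 0
  | a :: _ => a

-- ===== PRECONDITION & SPEC =====
def Spec_stonebreaker (nums : List Int) (out : Int) : Prop := out = stonebreaker_alt nums
instance (nums : List Int) (out : Int) : Decidable (Spec_stonebreaker nums out) := by unfold Spec_stonebreaker; infer_instance

-- ===== CLAIM (what is proved, stated in full; the proofs are below) =====
def Claim_equal_stonebreaker : Prop := ∀ (nums : List Int), Dom_stonebreaker nums → Spec_stonebreaker nums (stonebreaker nums)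

-- ===== LEMMAS AND PROOFS =====

theorem insortLoop_perm (d : Int) (l : List Int) : (insortLoop d l).Perm (d :: l) := by
  induction l with
  | nil => simp [insortLoop]
  | cons b t ih =>
    simp only [insortLoop]
    split
    · exact ((ih.cons b).trans (List.Perm.swap d b t))
    · exact List.Perm.refl _

theorem insortLoop_pairwise (d : Int) (l : List Int)
    (hl : l.Pairwise (· ≤ ·)) : (insortLoop d l).Pairwise (· ≤ ·) := by
  induction l with
  | nil => simp [insortLoop]
  | cons b t ih =>
    rw [List.pairwise_cons] at hl
    simp only [insortLoop]
    split
    · rename_i hbd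
      rw [List.pairwise_cons]
      refine ⟨fun y hy => ?_, ih hl.2⟩
      rcases List.mem_cons.mp ((insortLoop_perm d t).mem_iff.mp hy) with h | h
      · exact h ▸ le_of_lt hbd
      · exact hl.1 y h
    · rename_i hbd
      rw [Int.not_lt] at hbd
      rw [List.pairwise_cons]
      refine ⟨fun y hy => ?_, List.pairwise_cons.mpr hl⟩
      rcases List.mem_cons.mp hy with h | h
      · exact h ▸ hbd
      · exact le_trans hbd (hl.1 y h)

-- popping at the index of the first occurrence of v removes exactly that occurrence
theorem pop_index_eq_erase (l : List Int) (v : Int) (i : Nat)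
    (h : PySem.List.index? l v = some i) :
    PySem.List.pop? l (i : Int) = some (v, l.erase v) := by
  rcases (PySem.List.index?_eq_some_iff l v i).mp h with ⟨pre, suf, rfl, hlen, hnot⟩
  have hi : i < (pre ++ v :: suf).length := by simp [← hlen]
  rw [PySem.List.pop?_natCast _ i hi]
  have hget : (pre ++ v :: suf)[i] = v := by subst hlen; simp
  have herase : (pre ++ v :: suf).erase v = pre ++ suf := by
    rw [List.erase_append_right _ hnot, List.erase_cons_head]
  have heidx : (pre ++ v :: suf).eraseIdx i = pre ++ suf := by
    subst hlen
    rw [List.eraseIdx_append_of_length_le (le_refl _)]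
    simp
  rw [hget, herase, heidx]

-- the head of a sorted permutation is the value min? finds; erasing it leaves a perm of the tail
theorem min_head (l : List Int) (a : Int) (t : List Int)
    (hp : l.Perm (a :: t)) (hs : (a :: t).Pairwise (· ≤ ·)) (m : Int)
    (hm : PySem.List.min? l (fun v => v) = some m) :
    m = a ∧ (l.erase m).Perm t := by
  have hmem : m ∈ l := PySem.List.min?_mem hm
  have hmin : ∀ y ∈ l, m ≤ y := fun y hy => PySem.List.min?_isMin hm y hy
  have ha : a ≤ m := by
    rcases List.mem_cons.mp (hp.mem_iff.mp hmem) with h | h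
    · exact h.symm.le
    · exact (List.pairwise_cons.mp hs).1 m h
  have hma : m = a := le_antisymm (hmin a (hp.mem_iff.mpr List.mem_cons_self)) ha
  subst hma
  refine ⟨rfl, ?_⟩
  have := hp.erase m
  simpa [List.erase_cons_head] using this

theorem altLoop_short (l : List Int) (h : l.length ≤ 1) : altLoop l = l := by
  cases l with
  | nil => simp [altLoop]
  | cons a t =>
    cases t with
    | nil => simp [altLoop]
    | cons b t2 => simp at h

theorem altLoop_length_le (l : List Int) : (altLoop l).length ≤ 1 := by
  induction l using altLoop.induct with
  | case1 x y t d hd ih => rw [altLoop, if_pos hd]; exact ih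
  | case2 x y t d hd ih => rw [altLoop, if_neg hd]; exact ih
  | case3 l h =>
    cases l with
    | nil => simp [altLoop]
    | cons a t =>
      cases t with
      | nil => simp [altLoop]
      | cons b t2 => exact (h a b t2 rfl).elim

theorem perm_eq_of_len_le1 (u v : List Int) (hp : u.Perm v) (hl : v.length ≤ 1) : u = v := by
  cases v with
  | nil => exact List.perm_nil.mp hp
  | cons a t =>
    cases t with
    | nil => exact List.perm_singleton.mp hp
    | cons b t2 => simp at hl

theorem loop_agree (n : Nat) (l hs : List Int) (hn : l.length ≤ n + 1)
    (hp : l.Perm hs) (hsort : hs.Pairwise (· ≤ ·)) :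
    (stoneLoop n l).Perm (altLoop hs) := by
  induction n generalizing l hs with
  | zero =>
    rw [stoneLoop]
    have hlhs : hs.length ≤ 1 := by rw [← hp.length_eq]; omega
    rw [altLoop_short hs hlhs]
    exact hp
  | succ n ih =>
    by_cases hlen : 1 < l.length
    · have hlhs : l.length = hs.length := hp.length_eq
      obtain ⟨a, b, t, rfl⟩ : ∃ a b t, hs = a :: b :: t := by
        cases hs with
        | nil => rw [List.length_nil] at hlhs; omega
        | cons a u =>
          cases u with
          | nil => rw [List.length_cons, List.length_nil] at hlhs; omega
          | cons b t => exact ⟨a, b, t, rfl⟩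
      obtain ⟨m1, hm1⟩ : ∃ m1, PySem.List.min? l (fun v => v) = some m1 := by
        cases h : PySem.List.min? l (fun v => v) with
        | none => rw [PySem.List.min?_eq_none_iff] at h; subst h; simp at hlen
        | some m => exact ⟨m, rfl⟩
      obtain ⟨hma, hrest1⟩ := min_head l a (b :: t) hp hsort m1 hm1
      obtain ⟨i1, hi1⟩ : ∃ i1, PySem.List.index? l m1 = some i1 := by
        have hmem := (PySem.List.index?_isSome_iff l m1).mpr (PySem.List.min?_mem hm1)
        cases h : PySem.List.index? l m1 with
        | none => rw [h] at hmem; simp at hmem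
        | some i => exact ⟨i, rfl⟩
      have hpop1 := pop_index_eq_erase l m1 i1 hi1
      set rest1 := l.erase m1 with hr1
      have hsort_t : (b :: t).Pairwise (· ≤ ·) := (List.pairwise_cons.mp hsort).2
      obtain ⟨m2, hm2⟩ : ∃ m2, PySem.List.min? rest1 (fun v => v) = some m2 := by
        cases h : PySem.List.min? rest1 (fun v => v) with
        | none =>
          rw [PySem.List.min?_eq_none_iff] at h
          rw [h] at hrest1
          have := hrest1.length_eq; simp at this
        | some m => exact ⟨m, rfl⟩
      obtain ⟨hmb, hrest2⟩ := min_head rest1 b t hrest1 hsort_t m2 hm2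
      obtain ⟨i2, hi2⟩ : ∃ i2, PySem.List.index? rest1 m2 = some i2 := by
        have hmem := (PySem.List.index?_isSome_iff rest1 m2).mpr (PySem.List.min?_mem hm2)
        cases h : PySem.List.index? rest1 m2 with
        | none => rw [h] at hmem; simp at hmem
        | some i => exact ⟨i, rfl⟩
      have hpop2 := pop_index_eq_erase rest1 m2 i2 hi2
      set rest2 := rest1.erase m2 with hr2
      have hl1 : rest1.length + 1 = l.length :=
        PySem.List.length_of_pop?_eq_some l hpop1
      have hl2 : rest2.length + 1 = rest1.length :=
        PySem.List.length_of_pop?_eq_some rest1 hpop2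
      rw [stoneLoop]
      simp only [hlen, if_pos, hm1, hi1, hpop1, hm2, hi2, hpop2]
      rw [altLoop]
      subst hma hmb
      by_cases hxy : m1 = m2
      · subst hxy
        simp only [sub_self, ne_eq, not_true_eq_false, if_false]
        exact ih rest2 t (by omega) hrest2 (List.pairwise_cons.mp hsort_t).2
      · have hd : m2 - m1 ≠ 0 := by
          intro hc; exact hxy (by omega)
        simp only [ne_eq, hxy, not_false_eq_true, hd, if_pos]
        have hperm' : (rest2 ++ [m2 - m1]).Perm (insortLoop (m2 - m1) t) :=
          ((List.perm_append_singleton _ _).trans (hrest2.cons _)).trans (insortLoop_perm _ _).symm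
        exact ih (rest2 ++ [m2 - m1]) (insortLoop (m2 - m1) t)
          (by simp; omega) hperm'
          (insortLoop_pairwise _ _ (List.pairwise_cons.mp hsort_t).2)
    · rw [stoneLoop]
      simp only [hlen, if_false]
      have hlhs : hs.length ≤ 1 := by rw [← hp.length_eq]; omega
      rw [altLoop_short hs hlhs]
      exact hp

theorem stoneLoop_eq_altLoop (l hs : List Int)
    (hp : l.Perm hs) (hsort : hs.Pairwise (· ≤ ·)) :
    stoneLoop l.length l = altLoop hs := by
  have hperm := loop_agree l.length l hs (by omega) hp hsort
  exact perm_eq_of_len_le1 _ _ hperm (altLoop_length_le hs)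

-- ===== VERDICT (by name: the statement is the Claim_ definition above) =====
theorem stonebreaker_spec : Claim_equal_stonebreaker := by
  intro nums _
  unfold Spec_stonebreaker stonebreaker stonebreaker_alt
  rw [stoneLoop_eq_altLoop nums (PySem.List.sorted nums (fun v => v) false)
    (PySem.List.sorted_perm nums (fun v => v) false).symm
    (PySem.List.sorted_pairwise nums (fun v => v))]
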